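-- pv_equiv track=rewrite | github.com/Tamilarasantamilu/Leet-code-streak | 2593. Find_Score_of_an_Array_After_Marking_All_Elements.py | findScore
-- ===== SOURCE A (Python) =====
-- from typing import List
--
-- import heapq
--
-- def findScore(nums: List[int]) -> int:
--     n = len(nums)
--     min_heap = []
--     marked = [False] * n  # To keep track of marked elements
--
--     # Populate the heap with (value, index) pairs
--     for i, num in enumerate(nums):
--         heapq.heappush(min_heap, (num, i))
--
--     score = 0
--
--     while min_heap:
--         value, idx = heapq.heappop(min_heap)
--
--         # Skip if the element is already marked
--         if marked[idx]:
--             continue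
--
--         # Add to the score
--         score += value
--
--         # Mark the chosen element and its adjacent elements
--         marked[idx] = True
--         if idx > 0:
--             marked[idx - 1] = True
--         if idx < n - 1:
--             marked[idx + 1] = True
--
--     return score
-- ===== SOURCE B (Python) =====
-- def findScore(nums):
--     # Divide and conquer on the minimum: the smallest (value, index) element is
--     # always taken first; taking it removes itself and both neighbors, leaving two
--     # independent subarrays that are solved the same way (iterated with an explicit
--     # segment stack instead of a heap/sort + marked array).
--     score = 0
--     stack = [(0, len(nums))]
--     while stack:
--         lo, hi = stack.pop()
--         if lo >= hi:
--             continue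
--         m = lo
--         for i in range(lo + 1, hi):
--             if nums[i] < nums[m]:
--                 m = i
--         score += nums[m]
--         stack.append((lo, m - 1))
--         stack.append((m + 2, hi))
--     return score
-- ===== Notes on version B (the rewrite author's own statement) =====
-- stated objective: alternative
-- what changed: Replaces the heap-driven greedy (pop sorted (value,index) pairs, skip marked, mark neighbors) with a divide-and-conquer on the minimum: the segment's smallest element is taken and the segment splits into the two independent subarrays strictly left of its left neighbor and right of its right neighbor, processed with an explicit segment stack; no heap, no sorting, no marked structure.
import Mathlib
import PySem

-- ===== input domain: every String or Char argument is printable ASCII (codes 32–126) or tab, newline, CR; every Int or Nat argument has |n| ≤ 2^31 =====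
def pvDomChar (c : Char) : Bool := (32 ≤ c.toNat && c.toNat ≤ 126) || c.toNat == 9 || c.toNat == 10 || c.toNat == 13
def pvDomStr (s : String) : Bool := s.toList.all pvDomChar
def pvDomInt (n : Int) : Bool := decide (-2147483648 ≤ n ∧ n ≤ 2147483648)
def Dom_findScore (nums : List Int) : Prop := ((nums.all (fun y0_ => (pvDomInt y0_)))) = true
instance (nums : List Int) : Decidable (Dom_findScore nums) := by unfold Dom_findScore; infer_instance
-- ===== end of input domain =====

-- B replaces A's heap-driven greedy with a divide-and-conquer on the minimum:
-- taking a segment's smallest element splits it into two independent subsegments,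
-- processed with an explicit segment stack (no heap, no sort, no marked array).

-- ===== PORT A =====
-- Python tuple comparison (a, b) < (c, d) used by heapq on (value, index) pairs (exact).
def pairLt (a b : Int × Int) : Bool := decide (a.1 < b.1 ∨ (a.1 = b.1 ∧ a.2 < b.2))

-- heapq._siftdown(heap, startpos, pos), step for step; Python reads newitem = heap[pos]
-- once at entry and writes it at the final position — here it is passed as a parameter,
-- which is exact since the slot it came from is only ever overwritten.
-- (the fuel argument only bounds the parent chain, fuel = pos is always enough: exact)
def siftdownGo : Nat → List (Int × Int) → Nat → Nat → (Int × Int) → List (Int × Int)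
  | 0, heap, _, pos, newitem => heap.set pos newitem
  | fuel + 1, heap, startpos, pos, newitem =>
    if startpos < pos then
      let parentpos := (pos - 1) / 2
      let parent := heap.getD parentpos (0, 0)
      if pairLt newitem parent then
        siftdownGo fuel (heap.set pos parent) startpos parentpos newitem
      else heap.set pos newitem
    else heap.set pos newitem

def siftdown (heap : List (Int × Int)) (startpos pos : Nat) (newitem : Int × Int) :
    List (Int × Int) :=
  siftdownGo pos heap startpos pos newitem

-- heapq._siftup(heap, pos), step for step (startpos = pos at entry; newitem = heap[pos]
-- passed as a parameter exactly as in siftdown).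
-- (fuel bounds the descent, fuel = heap.length - pos is always enough: exact)
def siftupGo : Nat → List (Int × Int) → Nat → Nat → (Int × Int) → List (Int × Int)
  | 0, heap, startpos, pos, newitem => siftdown heap startpos pos newitem
  | fuel + 1, heap, startpos, pos, newitem =>
    let endpos := heap.length
    let childpos := 2 * pos + 1
    if childpos < endpos then
      let rightpos := childpos + 1
      let childpos' :=
        if rightpos < endpos ∧ ¬ (pairLt (heap.getD childpos (0, 0)) (heap.getD rightpos (0, 0)) = true)
        then rightpos else childpos
      siftupGo fuel (heap.set pos (heap.getD childpos' (0, 0))) startpos childpos' newitem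
    else
      -- Python: heap[pos] = newitem; _siftdown(heap, startpos, pos) — the write is folded
      -- into siftdown's newitem parameter (exact: that slot is never read before being set).
      siftdown heap startpos pos newitem

def siftup (heap : List (Int × Int)) (startpos pos : Nat) (newitem : Int × Int) :
    List (Int × Int) :=
  siftupGo (heap.length - pos) heap startpos pos newitem

-- heapq.heappush(heap, item) (exact)
def heappush (heap : List (Int × Int)) (item : Int × Int) : List (Int × Int) :=
  siftdown (heap ++ [item]) 0 heap.length item

-- heapq.heappop(heap): lastelt = heap.pop(); if heap: return-root-and-siftup else lastelt.
-- A only pops nonempty heaps; on [] this returns a dummy pair (never reached from findScore).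
def heappop (heap : List (Int × Int)) : (Int × Int) × List (Int × Int) :=
  let lastelt := (heap.getLast?).getD (0, 0)
  let rest := heap.dropLast
  if rest.isEmpty then (lastelt, [])
  else (rest.getD 0 (0, 0), siftup (rest.set 0 lastelt) 0 0 lastelt)

-- while min_heap: pop; skip if marked; else add to score and mark idx, idx-1, idx+1
-- (the fuel only bounds the loop, fuel = heap.length is always enough: exact).
def loopAGo : Nat → List (Int × Int) → List Bool → Nat → Int → Int
  | 0, _, _, _, score => score
  | fuel + 1, heap, marked, n, score =>
    if heap = [] then score
    else
      let pr := heappop heap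
      let value := pr.1.1
      let idx := pr.1.2
      if marked.getD idx.toNat false then loopAGo fuel pr.2 marked n score
      else
        let m1 := marked.set idx.toNat true
        let m2 := if 0 < idx then m1.set (idx - 1).toNat true else m1
        let m3 := if idx < (n : Int) - 1 then m2.set (idx + 1).toNat true else m2
        loopAGo fuel pr.2 m3 n (score + value)

def loopA (heap : List (Int × Int)) (marked : List Bool) (n : Nat) (score : Int) : Int :=
  loopAGo heap.length heap marked n score

def findScore (nums : List Int) : Int :=
  let n := nums.length
  let min_heap := (PySem.List.enumerate nums).foldl (fun h p => heappush h (p.2, p.1)) []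
  let marked := List.replicate n false
  loopA min_heap marked n 0

-- ===== PORT B =====
-- inner for-loop: m = lo; for i in range(lo+1, hi): if nums[i] < nums[m]: m = i
-- (every access nums[i] has 0 ≤ i < len nums when called from the loop below, so getD is exact)
def argminGo : List Int → Int → Int → Nat → Int
  | _, m, _, 0 => m
  | nums, m, i, k + 1 =>
    argminGo nums (if nums.getD i.toNat 0 < nums.getD m.toNat 0 then i else m) (i + 1) k

def argminSeg (nums : List Int) (lo hi : Int) : Int :=
  argminGo nums lo (lo + 1) (hi - (lo + 1)).toNat

-- the scan's result is the start index or a scanned index (needed for loopB's termination)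
theorem argminGo_range : ∀ (k : Nat) (nums : List Int) (m i : Int),
    argminGo nums m i k = m ∨ (i ≤ argminGo nums m i k ∧ argminGo nums m i k < i + k) := by
  intro k
  induction k with
  | zero => intro nums m i; left; rfl
  | succ k ih =>
    intro nums m i
    simp only [argminGo]
    rcases ih nums (if nums.getD i.toNat 0 < nums.getD m.toNat 0 then i else m) (i + 1) with
      h | ⟨h1, h2⟩
    · rw [h]; split_ifs <;> [right; left] <;> omega
    · right; omega

theorem argminSeg_mem (nums : List Int) (lo hi : Int) (h : lo < hi) :
    lo ≤ argminSeg nums lo hi ∧ argminSeg nums lo hi < hi := by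
  unfold argminSeg
  rcases argminGo_range (hi - (lo + 1)).toNat nums lo (lo + 1) with h1 | ⟨h1, h2⟩
  · omega
  · omega

-- while stack: pop (lo, hi); skip empty segments; else take the segment minimum and
-- push the two remaining subsegments ((lo, m-1) then (m+2, hi), so (m+2, hi) is on top)
def loopB (nums : List Int) (stack : List (Int × Int)) (score : Int) : Int :=
  match stack with
  | [] => score
  | (lo, hi) :: rest =>
    if lo ≥ hi then loopB nums rest score
    else
      let m := argminSeg nums lo hi
      loopB nums ((m + 2, hi) :: (lo, m - 1) :: rest) (score + nums.getD m.toNat 0)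
termination_by (stack.map (fun s => 2 * (s.2 - s.1).toNat + 1)).sum
decreasing_by
  · simp only [List.map_cons, List.sum_cons]; omega
  · have hm := argminSeg_mem nums lo hi (by omega)
    simp only [List.map_cons, List.sum_cons]
    omega

def findScore_alt (nums : List Int) : Int :=
  loopB nums [(0, (nums.length : Int))] 0

-- ===== PRECONDITION & SPEC =====
def Spec_findScore (nums : List Int) (out : Int) : Prop := out = findScore_alt nums
instance (nums : List Int) (out : Int) : Decidable (Spec_findScore nums out) := by unfold Spec_findScore; infer_instance

-- ===== CLAIM (what is proved, stated in full; the proofs are below) =====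
def Claim_equal_findScore : Prop := ∀ (nums : List Int), Dom_findScore nums → Spec_findScore nums (findScore nums)

-- ===== LEMMAS AND PROOFS =====

-- Python's tuple `<` and `<=` as propositions on (value, index) pairs.
def pLt (a b : Int × Int) : Prop := a.1 < b.1 ∨ (a.1 = b.1 ∧ a.2 < b.2)
def pLe (a b : Int × Int) : Prop := a.1 < b.1 ∨ (a.1 = b.1 ∧ a.2 ≤ b.2)

theorem pairLt_iff (a b : Int × Int) : pairLt a b = true ↔ pLt a b := by
  simp [pairLt, pLt]

theorem not_pLt (a b : Int × Int) : ¬ pLt a b ↔ pLe b a := by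
  simp only [pLt, pLe]; omega

theorem pLe_refl (a : Int × Int) : pLe a a := by simp [pLe]

theorem pLe_trans {a b c : Int × Int} : pLe a b → pLe b c → pLe a c := by
  simp only [pLe]; omega

theorem pLt_le_trans {a b c : Int × Int} : pLt a b → pLe b c → pLe a c := by
  simp only [pLt, pLe]; omega

theorem pLt_le (a b : Int × Int) : pLt a b → pLe a b := by simp only [pLt, pLe]; omega

theorem pLe_antisymm {a b : Int × Int} : pLe a b → pLe b a → a = b := by
  obtain ⟨a1, a2⟩ := a; obtain ⟨b1, b2⟩ := b
  simp only [pLe, Prod.mk.injEq]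
  omega

theorem getD_set_self {α : Type} (l : List α) (i : Nat) (a d : α) (h : i < l.length) :
    (l.set i a).getD i d = a := by
  simp [List.getD, List.getElem?_set_self h]

theorem getD_set_ne {α : Type} (l : List α) {i j : Nat} (a d : α) (h : i ≠ j) :
    (l.set i a).getD j d = l.getD j d := by
  simp [List.getD, List.getElem?_set_ne h]

theorem getD_append_left {α : Type} (l l' : List α) (j : Nat) (d : α) (h : j < l.length) :
    ((l ++ l').getD j d) = l.getD j d := by
  simp [List.getD, List.getElem?_append_left h]

theorem getD_dropLast {α : Type} (l : List α) (j : Nat) (d : α) (h : j < l.length - 1) :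
    (l.dropLast).getD j d = l.getD j d := by
  simp only [List.getD, List.dropLast_eq_take, List.getElem?_take]
  simp [h, (by omega : j < l.length)]

theorem length_siftdownGo : ∀ (f : Nat) (heap : List (Int × Int)) (s p : Nat) (ni : Int × Int),
    (siftdownGo f heap s p ni).length = heap.length := by
  intro f
  induction f with
  | zero => intro heap s p ni; simp [siftdownGo]
  | succ f ih =>
    intro heap s p ni
    simp only [siftdownGo]
    split_ifs <;> simp [ih]

theorem length_siftdown (heap : List (Int × Int)) (startpos pos : Nat) (ni : Int × Int) :
    (siftdown heap startpos pos ni).length = heap.length :=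
  length_siftdownGo pos heap startpos pos ni

theorem length_siftupGo : ∀ (f : Nat) (heap : List (Int × Int)) (s p : Nat) (ni : Int × Int),
    (siftupGo f heap s p ni).length = heap.length := by
  intro f
  induction f with
  | zero => intro heap s p ni; simp [siftupGo, length_siftdown]
  | succ f ih =>
    intro heap s p ni
    simp only [siftupGo]
    split_ifs <;> simp [ih, length_siftdown]

theorem length_siftup (heap : List (Int × Int)) (startpos pos : Nat) (ni : Int × Int) :
    (siftup heap startpos pos ni).length = heap.length :=
  length_siftupGo _ heap startpos pos ni

theorem length_heappop (heap : List (Int × Int)) (h : heap ≠ []) :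
    (heappop heap).2.length + 1 = heap.length := by
  unfold heappop
  by_cases he : heap.dropLast.isEmpty
  · simp [he]
    rcases heap with _ | ⟨a, t⟩
    · exact absurd rfl h
    · rcases t with _ | ⟨b, t⟩
      · simp
      · simp [List.dropLast] at he
  · simp [he, length_siftup]
    have : heap.dropLast.length = heap.length - 1 := by simp
    have : heap.length ≠ 0 := by simpa using h
    omega

theorem siftdownGo_irrel : ∀ (f1 : Nat) (f2 : Nat) (heap : List (Int × Int)) (s p : Nat)
    (ni : Int × Int), p ≤ f1 → p ≤ f2 →
    siftdownGo f1 heap s p ni = siftdownGo f2 heap s p ni := by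
  intro f1
  induction f1 with
  | zero =>
    intro f2 heap s p ni h1 h2
    have hp : p = 0 := by omega
    subst hp
    cases f2 <;> simp [siftdownGo]
  | succ f1 ih =>
    intro f2 heap s p ni h1 h2
    cases f2 with
    | zero =>
      have hp : p = 0 := by omega
      subst hp
      simp [siftdownGo]
    | succ f2 =>
      simp only [siftdownGo]
      split_ifs with hs hcmp
      · exact ih f2 _ s _ ni (by omega) (by omega)
      · rfl
      · rfl

theorem siftdown_eq (heap : List (Int × Int)) (s pos : Nat) (ni : Int × Int) :
    siftdown heap s pos ni =
      (if s < pos then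
        (if pairLt ni (heap.getD ((pos - 1) / 2) (0, 0)) = true then
          siftdown (heap.set pos (heap.getD ((pos - 1) / 2) (0, 0))) s ((pos - 1) / 2) ni
        else heap.set pos ni)
      else heap.set pos ni) := by
  unfold siftdown
  cases pos with
  | zero => simp [siftdownGo]
  | succ p =>
    simp only [siftdownGo]
    split_ifs with hs hcmp
    · exact siftdownGo_irrel p ((p + 1 - 1) / 2) _ s _ ni (by omega) (by omega)
    · rfl
    · rfl

theorem siftupGo_irrel : ∀ (f1 : Nat) (f2 : Nat) (heap : List (Int × Int)) (s p : Nat)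
    (ni : Int × Int), heap.length - p ≤ f1 → heap.length - p ≤ f2 →
    siftupGo f1 heap s p ni = siftupGo f2 heap s p ni := by
  intro f1
  induction f1 with
  | zero =>
    intro f2 heap s p ni h1 h2
    cases f2 with
    | zero => rfl
    | succ f2 => simp only [siftupGo]; rw [if_neg (by omega)]
  | succ f1 ih =>
    intro f2 heap s p ni h1 h2
    cases f2 with
    | zero => simp only [siftupGo]; rw [if_neg (by omega)]
    | succ f2 =>
      simp only [siftupGo]
      split_ifs with hch hmin
      · refine ih f2 _ s _ ni ?_ ?_ <;> · simp only [List.length_set]; omega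
      · refine ih f2 _ s _ ni ?_ ?_ <;> · simp only [List.length_set]; omega
      · rfl

theorem siftup_eq (heap : List (Int × Int)) (s pos : Nat) (ni : Int × Int) :
    siftup heap s pos ni =
      (if 2 * pos + 1 < heap.length then
        siftup
          (heap.set pos (heap.getD
            (if 2 * pos + 1 + 1 < heap.length ∧
                ¬ (pairLt (heap.getD (2 * pos + 1) (0, 0)) (heap.getD (2 * pos + 1 + 1) (0, 0)) = true)
             then 2 * pos + 1 + 1 else 2 * pos + 1) (0, 0))) s
          (if 2 * pos + 1 + 1 < heap.length ∧
              ¬ (pairLt (heap.getD (2 * pos + 1) (0, 0)) (heap.getD (2 * pos + 1 + 1) (0, 0)) = true)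
           then 2 * pos + 1 + 1 else 2 * pos + 1) ni
      else siftdown heap s pos ni) := by
  unfold siftup
  rcases hk : heap.length - pos with _ | f
  · simp only [siftupGo]
    rw [if_neg (by omega)]
  · simp only [siftupGo]
    split_ifs with hch hmin
    · refine siftupGo_irrel f _ _ s _ ni ?_ ?_ <;> · simp only [List.length_set]; omega
    · refine siftupGo_irrel f _ _ s _ ni ?_ ?_ <;> · simp only [List.length_set]; omega
    · rfl

theorem loopAGo_irrel : ∀ (f1 : Nat) (f2 : Nat) (heap : List (Int × Int)) (marked : List Bool)
    (n : Nat) (score : Int), heap.length ≤ f1 → heap.length ≤ f2 →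
    loopAGo f1 heap marked n score = loopAGo f2 heap marked n score := by
  intro f1
  induction f1 with
  | zero =>
    intro f2 heap marked n score h1 h2
    have hemp : heap = [] := by
      cases heap with
      | nil => rfl
      | cons a t => simp at h1
    subst hemp
    cases f2 <;> simp [loopAGo]
  | succ f1 ih =>
    intro f2 heap marked n score h1 h2
    cases f2 with
    | zero =>
      have hemp : heap = [] := by
        cases heap with
        | nil => rfl
        | cons a t => simp at h2
      subst hemp
      simp [loopAGo]
    | succ f2 =>
      simp only [loopAGo]
      split_ifs with hne hm
      · rfl
      all_goals
        refine ih f2 (heappop heap).2 _ n _ ?_ ?_ <;>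
          · have := length_heappop heap hne; omega

theorem loopA_eq (heap : List (Int × Int)) (marked : List Bool) (n : Nat) (score : Int) :
    loopA heap marked n score =
      (if heap = [] then score
      else
        if marked.getD (heappop heap).1.2.toNat false then loopA (heappop heap).2 marked n score
        else
          loopA (heappop heap).2
            (if (heappop heap).1.2 < (n : Int) - 1
             then (if 0 < (heappop heap).1.2
                   then (marked.set (heappop heap).1.2.toNat true).set
                     ((heappop heap).1.2 - 1).toNat true
                   else marked.set (heappop heap).1.2.toNat true).set
               ((heappop heap).1.2 + 1).toNat true
             else (if 0 < (heappop heap).1.2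
                   then (marked.set (heappop heap).1.2.toNat true).set
                     ((heappop heap).1.2 - 1).toNat true
                   else marked.set (heappop heap).1.2.toNat true)) n
            (score + (heappop heap).1.1)) := by
  unfold loopA
  rcases hk : heap.length with _ | f
  · have hemp : heap = [] := by
      cases heap with
      | nil => rfl
      | cons a t => simp at hk
    subst hemp
    simp [loopAGo]
  · have hne : heap ≠ [] := by
      cases heap with
      | nil => simp at hk
      | cons a t => simp
    simp only [loopAGo, if_neg hne]
    have hl := length_heappop heap hne
    split_ifs with hm
    all_goals
      refine loopAGo_irrel f _ (heappop heap).2 _ n _ ?_ ?_ <;> omega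

-- the binary-heap invariant: each child is ≥ its parent
def heapInv (h : List (Int × Int)) : Prop :=
  ∀ c : Nat, 0 < c → c < h.length →
    pLe (h.getD ((c - 1) / 2) (0, 0)) (h.getD c (0, 0))

theorem siftdown_inv (pos : Nat) : ∀ (heap : List (Int × Int)) (ni : Int × Int),
    pos < heap.length →
    (∀ c : Nat, 0 < c → c < heap.length → c ≠ pos → (c - 1) / 2 ≠ pos →
      pLe (heap.getD ((c - 1) / 2) (0, 0)) (heap.getD c (0, 0))) →
    (∀ c : Nat, 0 < c → c < heap.length → (c - 1) / 2 = pos → pLe ni (heap.getD c (0, 0))) →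
    (∀ c : Nat, 0 < c → c < heap.length → (c - 1) / 2 = pos → 0 < pos →
      pLe (heap.getD ((pos - 1) / 2) (0, 0)) (heap.getD c (0, 0))) →
    heapInv (siftdown heap 0 pos ni) := by
  induction pos using Nat.strong_induction_on with
  | _ pos ih =>
    intro heap ni hp A1 A2 A3
    rw [siftdown_eq]
    split_ifs with hpos hcmp
    case neg =>
      rw [pairLt_iff] at hcmp
      intro c hc0 hcl
      simp only [List.length_set] at hcl
      by_cases hcpos : c = pos
      · rw [hcpos, getD_set_self _ _ _ _ hp, getD_set_ne _ _ _ (by omega)]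
        exact (not_pLt _ _).mp hcmp
      · by_cases hppos : (c - 1) / 2 = pos
        · rw [hppos, getD_set_self _ _ _ _ hp, getD_set_ne _ _ _ (by omega)]
          exact A2 c hc0 hcl hppos
        · rw [getD_set_ne _ _ _ (by omega), getD_set_ne _ _ _ (by omega)]
          exact A1 c hc0 hcl hcpos hppos
    case pos =>
      rw [pairLt_iff] at hcmp
      apply ih ((pos - 1) / 2) (by omega) (heap.set pos (heap.getD ((pos - 1) / 2) (0, 0))) ni
        (by simpa using (by omega : (pos - 1) / 2 < heap.length))
      · intro c hc0 hcl hcne hpar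
        simp only [List.length_set] at hcl
        by_cases hcpos : c = pos
        · exact absurd (by rw [hcpos]) hpar
        · by_cases hppos : (c - 1) / 2 = pos
          · rw [hppos, getD_set_self _ _ _ _ hp, getD_set_ne _ _ _ (by omega)]
            exact A3 c hc0 hcl hppos hpos
          · rw [getD_set_ne _ _ _ (by omega), getD_set_ne _ _ _ (by omega)]
            exact A1 c hc0 hcl hcpos hppos
      · intro c hc0 hcl hpar
        simp only [List.length_set] at hcl
        by_cases hcpos : c = pos
        · rw [hcpos, getD_set_self _ _ _ _ hp]
          exact pLt_le _ _ hcmp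
        · rw [getD_set_ne _ _ _ (by omega)]
          have h1 := A1 c hc0 hcl hcpos (by omega)
          rw [hpar] at h1
          exact pLt_le_trans hcmp h1
      · intro c hc0 hcl hpar hpp0
        simp only [List.length_set] at hcl
        have hgp : pLe (heap.getD (((pos - 1) / 2 - 1) / 2) (0, 0))
            (heap.getD ((pos - 1) / 2) (0, 0)) :=
          A1 ((pos - 1) / 2) hpp0 (by omega) (by omega) (by omega)
        rw [getD_set_ne _ _ _ (by omega)]
        by_cases hcpos : c = pos
        · rw [hcpos, getD_set_self _ _ _ _ hp]
          exact hgp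
        · rw [getD_set_ne _ _ _ (by omega)]
          have h1 := A1 c hc0 hcl hcpos (by omega)
          rw [hpar] at h1
          exact pLe_trans hgp h1
    case neg =>
      intro c hc0 hcl
      simp only [List.length_set] at hcl
      have hcpos : c ≠ pos := by omega
      by_cases hppos : (c - 1) / 2 = pos
      · rw [hppos, getD_set_self _ _ _ _ hp, getD_set_ne _ _ _ (by omega)]
        exact A2 c hc0 hcl hppos
      · rw [getD_set_ne _ _ _ (by omega), getD_set_ne _ _ _ (by omega)]
        exact A1 c hc0 hcl hcpos hppos

theorem siftup_inv (k : Nat) : ∀ (pos : Nat) (heap : List (Int × Int)) (ni : Int × Int),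
    heap.length - pos = k → pos < heap.length →
    (∀ c : Nat, 0 < c → c < heap.length → (c - 1) / 2 ≠ pos →
      pLe (heap.getD ((c - 1) / 2) (0, 0)) (heap.getD c (0, 0))) →
    (∀ c : Nat, 0 < c → c < heap.length → (c - 1) / 2 = pos → 0 < pos →
      pLe (heap.getD ((pos - 1) / 2) (0, 0)) (heap.getD c (0, 0))) →
    heapInv (siftup heap 0 pos ni) := by
  induction k using Nat.strong_induction_on with
  | _ k ih =>
    intro pos heap ni hk hp B1 B2
    rw [siftup_eq]
    by_cases hch : 2 * pos + 1 < heap.length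
    · rw [if_pos hch]
      by_cases hmin : 2 * pos + 1 + 1 < heap.length ∧
          ¬ (pairLt (heap.getD (2 * pos + 1) (0, 0)) (heap.getD (2 * pos + 1 + 1) (0, 0)) = true)
      · simp only [if_pos hmin]
        obtain ⟨hr, hnlt⟩ := hmin
        rw [pairLt_iff] at hnlt
        have hmc : ∀ s : Nat, 0 < s → s < heap.length → (s - 1) / 2 = pos →
            pLe (heap.getD (2 * pos + 1 + 1) (0, 0)) (heap.getD s (0, 0)) := by
          intro s hs0 hsl hsp
          have : s = 2 * pos + 1 ∨ s = 2 * pos + 2 := by omega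
          rcases this with h | h
          · subst h; exact (not_pLt _ _).mp hnlt
          · subst h; exact pLe_refl _
        apply ih (heap.length - (2 * pos + 1 + 1)) (by omega) (2 * pos + 1 + 1)
          (heap.set pos (heap.getD (2 * pos + 1 + 1) (0, 0))) ni (by simp) (by simpa using hr)
        · intro c hc0 hcl hpar
          simp only [List.length_set] at hcl
          by_cases hcpos : c = pos
          · rw [hcpos, getD_set_ne _ _ _ (by omega), getD_set_self _ _ _ _ hp]
            exact B2 (2 * pos + 1 + 1) (by omega) hr (by omega) (by omega)
          · by_cases hppar : (c - 1) / 2 = pos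
            · rw [hppar, getD_set_self _ _ _ _ hp, getD_set_ne _ _ _ (by omega)]
              exact hmc c hc0 hcl hppar
            · rw [getD_set_ne _ _ _ (by omega), getD_set_ne _ _ _ (by omega)]
              exact B1 c hc0 hcl hppar
        · intro c hc0 hcl hpar hc0'
          simp only [List.length_set] at hcl
          have hcp : c ≠ pos := by omega
          rw [(by omega : (2 * pos + 1 + 1 - 1) / 2 = pos), getD_set_self _ _ _ _ hp,
            getD_set_ne _ _ _ (by omega)]
          have h1 := B1 c hc0 hcl (by omega)
          rw [hpar] at h1
          exact h1
      · simp only [if_neg hmin]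
        have hmc : ∀ s : Nat, 0 < s → s < heap.length → (s - 1) / 2 = pos →
            pLe (heap.getD (2 * pos + 1) (0, 0)) (heap.getD s (0, 0)) := by
          intro s hs0 hsl hsp
          have : s = 2 * pos + 1 ∨ s = 2 * pos + 2 := by omega
          rcases this with h | h
          · subst h; exact pLe_refl _
          · subst h
            have : pairLt (heap.getD (2 * pos + 1) (0, 0)) (heap.getD (2 * pos + 1 + 1) (0, 0)) = true := by
              by_contra hq
              exact hmin ⟨by omega, fun hx => hq hx⟩
            rw [pairLt_iff] at this
            exact pLt_le _ _ this
        apply ih (heap.length - (2 * pos + 1)) (by omega) (2 * pos + 1)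
          (heap.set pos (heap.getD (2 * pos + 1) (0, 0))) ni (by simp) (by simpa using hch)
        · intro c hc0 hcl hpar
          simp only [List.length_set] at hcl
          by_cases hcpos : c = pos
          · rw [hcpos, getD_set_ne _ _ _ (by omega), getD_set_self _ _ _ _ hp]
            exact B2 (2 * pos + 1) (by omega) hch (by omega) (by omega)
          · by_cases hppar : (c - 1) / 2 = pos
            · rw [hppar, getD_set_self _ _ _ _ hp, getD_set_ne _ _ _ (by omega)]
              exact hmc c hc0 hcl hppar
            · rw [getD_set_ne _ _ _ (by omega), getD_set_ne _ _ _ (by omega)]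
              exact B1 c hc0 hcl hppar
        · intro c hc0 hcl hpar hc0'
          simp only [List.length_set] at hcl
          have hcp : c ≠ pos := by omega
          rw [(by omega : (2 * pos + 1 - 1) / 2 = pos), getD_set_self _ _ _ _ hp,
            getD_set_ne _ _ _ (by omega)]
          have h1 := B1 c hc0 hcl (by omega)
          rw [hpar] at h1
          exact h1
    · rw [if_neg hch]
      apply siftdown_inv pos heap ni hp
      · intro c hc0 hcl hcne hppar
        exact B1 c hc0 hcl hppar
      · intro c hc0 hcl hpar
        omega
      · intro c hc0 hcl hpar h0
        omega

theorem heappush_inv (h : List (Int × Int)) (x : Int × Int) (hinv : heapInv h) :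
    heapInv (heappush h x) := by
  unfold heappush
  apply siftdown_inv h.length (h ++ [x]) x (by simp)
  · intro c hc0 hcl hcne hppar
    have hcl' : c < h.length + 1 := by simpa using hcl
    rw [getD_append_left _ _ _ _ (by omega), getD_append_left _ _ _ _ (by omega)]
    exact hinv c hc0 (by omega)
  · intro c hc0 hcl hpar
    have hcl' : c < h.length + 1 := by simpa using hcl
    omega
  · intro c hc0 hcl hpar h0
    have hcl' : c < h.length + 1 := by simpa using hcl
    omega

theorem heappop_inv (h : List (Int × Int)) (hne : h ≠ []) (hinv : heapInv h) :
    heapInv (heappop h).2 := by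
  unfold heappop
  by_cases he : (h.dropLast).isEmpty
  · simp only [he, if_true]
    intro c hc0 hcl
    simp at hcl
  · simp only [he, if_false, Bool.false_eq_true]
    have hrl : 0 < h.dropLast.length := by
      rcases List.isEmpty_iff.not.mp (by simpa using he) with _
      cases hq : h.dropLast with
      | nil => simp [hq] at he
      | cons a t => simp
    apply siftup_inv (h.dropLast.length) 0 ((h.dropLast).set 0 ((h.getLast?).getD (0, 0)))
      _ (by simp) (by simpa using hrl)
    · intro c hc0 hcl hpar
      simp only [List.length_set] at hcl
      have hdl : h.dropLast.length = h.length - 1 := by simp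
      rw [getD_set_ne _ _ _ (by omega), getD_set_ne _ _ _ (by omega),
        getD_dropLast _ _ _ (by omega), getD_dropLast _ _ _ (by omega)]
      exact hinv c hc0 (by omega)
    · intro c hc0 hcl hpar h0
      omega

theorem root_min (h : List (Int × Int)) (hinv : heapInv h) :
    ∀ c : Nat, c < h.length → pLe (h.getD 0 (0, 0)) (h.getD c (0, 0)) := by
  intro c
  induction c using Nat.strong_induction_on with
  | _ c ih =>
    intro hc
    rcases Nat.eq_zero_or_pos c with h0 | h0
    · subst h0; exact pLe_refl _
    · exact pLe_trans (ih ((c - 1) / 2) (by omega) (by omega)) (hinv c h0 hc)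

theorem count_set {α : Type} [BEq α] [LawfulBEq α] :
    ∀ (l : List α) (i : Nat) (a d x : α), i < l.length →
    (l.set i a).count x + (if (l.getD i d == x) = true then 1 else 0)
      = l.count x + (if (a == x) = true then 1 else 0) := by
  intro l
  induction l with
  | nil => intro i a d x h; simp at h
  | cons b t ih =>
    intro i a d x h
    cases i with
    | zero =>
      simp only [List.set_cons_zero, List.getD_cons_zero, List.count_cons]
      omega
    | succ i =>
      simp only [List.set_cons_succ, List.getD_cons_succ, List.count_cons]
      have := ih i a d x (by simpa using h)
      omega

theorem perm_set_getD {l : List (Int × Int)} {i j : Nat} (a : Int × Int)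
    (hi : i < l.length) (hj : j < l.length) (hij : i ≠ j) :
    ((l.set i (l.getD j (0, 0))).set j a).Perm (l.set i a) := by
  rw [List.perm_iff_count]
  intro x
  have h1 := count_set (l.set i (l.getD j (0, 0))) j a (0, 0) x (by simpa using hj)
  rw [getD_set_ne _ _ _ hij] at h1
  have h2 := count_set l i (l.getD j (0, 0)) (0, 0) x hi
  have h3 := count_set l i a (0, 0) x hi
  omega

theorem perm_siftdown (pos : Nat) : ∀ (heap : List (Int × Int)) (ni : Int × Int),
    pos < heap.length → (siftdown heap 0 pos ni).Perm (heap.set pos ni) := by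
  induction pos using Nat.strong_induction_on with
  | _ pos ih =>
    intro heap ni hp
    rw [siftdown_eq]
    split_ifs with hpos hcmp
    · exact ((ih ((pos - 1) / 2) (by omega) _ ni
        (by simpa using (by omega : (pos - 1) / 2 < heap.length))).trans
        (perm_set_getD ni hp (by omega) (by omega)))
    · exact List.Perm.refl _
    · exact List.Perm.refl _

theorem perm_siftup (k : Nat) : ∀ (pos : Nat) (heap : List (Int × Int)) (ni : Int × Int),
    heap.length - pos = k → pos < heap.length →
    (siftup heap 0 pos ni).Perm (heap.set pos ni) := by
  induction k using Nat.strong_induction_on with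
  | _ k ih =>
    intro pos heap ni hk hp
    rw [siftup_eq]
    by_cases hch : 2 * pos + 1 < heap.length
    · rw [if_pos hch]
      by_cases hmin : 2 * pos + 1 + 1 < heap.length ∧
          ¬ (pairLt (heap.getD (2 * pos + 1) (0, 0)) (heap.getD (2 * pos + 1 + 1) (0, 0)) = true)
      · simp only [if_pos hmin]
        exact ((ih (heap.length - (2 * pos + 1 + 1)) (by omega) (2 * pos + 1 + 1) _ ni (by simp)
          (by simpa using hmin.1)).trans
          (perm_set_getD ni hp (by omega) (by omega)))
      · simp only [if_neg hmin]
        exact ((ih (heap.length - (2 * pos + 1)) (by omega) (2 * pos + 1) _ ni (by simp)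
          (by simpa using hch)).trans
          (perm_set_getD ni hp (by omega) (by omega)))
    · rw [if_neg hch]
      exact perm_siftdown pos heap ni hp

theorem set_append_last {α : Type} (h : List α) (x y : α) :
    (h ++ [x]).set h.length y = h ++ [y] := by
  induction h with
  | nil => simp
  | cons a t ih => simp [ih]

theorem perm_heappush (h : List (Int × Int)) (x : Int × Int) :
    (heappush h x).Perm (h ++ [x]) := by
  have := perm_siftdown h.length (h ++ [x]) x (by simp)
  rwa [set_append_last] at this

theorem heappop_fst (h : List (Int × Int)) (hne : h ≠ []) :
    (heappop h).1 = h.getD 0 (0, 0) := by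
  unfold heappop
  by_cases he : (h.dropLast).isEmpty
  · simp only [he, if_true]
    cases h with
    | nil => exact absurd rfl hne
    | cons a t =>
      cases t with
      | nil => simp
      | cons b t' => simp at he
  · simp only [he, if_false, Bool.false_eq_true]
    have hrl : 0 < h.dropLast.length := by
      cases hq : h.dropLast with
      | nil => simp [hq] at he
      | cons a t => simp
    have hdl : h.dropLast.length = h.length - 1 := by simp
    exact getD_dropLast _ _ _ (by omega)

theorem heappop_perm (h : List (Int × Int)) (hne : h ≠ []) :
    ((heappop h).1 :: (heappop h).2).Perm h := by
  unfold heappop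
  by_cases he : (h.dropLast).isEmpty
  · simp only [he, if_true]
    cases h with
    | nil => exact absurd rfl hne
    | cons a t =>
      cases t with
      | nil => simp
      | cons b t' => simp at he
  · simp only [he, if_false, Bool.false_eq_true]
    have hrne : h.dropLast ≠ [] := by simpa using he
    obtain ⟨r0, rt, hr⟩ := List.exists_cons_of_ne_nil hrne
    have hsu := perm_siftup ((h.dropLast).set 0 ((h.getLast?).getD (0, 0))).length 0
      ((h.dropLast).set 0 ((h.getLast?).getD (0, 0))) ((h.getLast?).getD (0, 0))
      (by simp) (by rw [List.length_set, hr]; simp)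
    rw [List.set_set] at hsu
    have hL : (h.getLast?).getD (0, 0) = h.getLast hne := by
      rw [List.getLast?_eq_getLast hne]; rfl
    have hback : h.dropLast ++ [h.getLast hne] = h := List.dropLast_concat_getLast hne
    refine List.Perm.trans (List.Perm.cons _ hsu) ?_
    rw [hr] at hback ⊢
    simp only [List.set_cons_zero, List.getD_cons_zero]
    rw [hL]
    have p1 : (r0 :: h.getLast hne :: rt).Perm (r0 :: (rt ++ [h.getLast hne])) :=
      List.Perm.cons _ (List.perm_append_singleton _ _).symm
    have p2 : r0 :: (rt ++ [h.getLast hne]) = h := by simpa using hback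
    exact p1.trans (by rw [p2])

-- the sequence of heappop results, as A's while-loop produces them
def popSeq (h : List (Int × Int)) : List (Int × Int) :=
  if hne : h = [] then [] else (heappop h).1 :: popSeq (heappop h).2
termination_by h.length
decreasing_by have := length_heappop h hne; omega

theorem popSeq_perm_pairwise (k : Nat) : ∀ (h : List (Int × Int)), h.length = k →
    heapInv h → (popSeq h).Perm h ∧ List.Pairwise pLe (popSeq h) := by
  induction k using Nat.strong_induction_on with
  | _ k ih =>
    intro h hk hinv
    rw [popSeq]
    split_ifs with hne
    · subst hne; exact ⟨List.Perm.refl _, List.Pairwise.nil⟩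
    · have hl := length_heappop h hne
      obtain ⟨ihp, ihpw⟩ := ih ((heappop h).2.length) (by omega) _ rfl (heappop_inv h hne hinv)
      have hperm : ((heappop h).1 :: popSeq (heappop h).2).Perm h :=
        (List.Perm.cons _ ihp).trans (heappop_perm h hne)
      refine ⟨hperm, List.pairwise_cons.mpr ⟨?_, ihpw⟩⟩
      intro y hy
      have hyh : y ∈ h :=
        (heappop_perm h hne).subset (List.mem_cons_of_mem _ (ihp.subset hy))
      obtain ⟨c, hc, hceq⟩ := List.getElem_of_mem hyh
      have hm := root_min h hinv c hc
      rw [List.getD_eq_getElem _ _ hc, hceq] at hm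
      rw [heappop_fst h hne]
      exact hm

theorem build_inv_perm : ∀ (l : List (Int × Int)) (h0 : List (Int × Int)), heapInv h0 →
    heapInv (l.foldl heappush h0) ∧ (l.foldl heappush h0).Perm (h0 ++ l) := by
  intro l
  induction l with
  | nil => intro h0 hinv; exact ⟨hinv, by simp⟩
  | cons x t ih =>
    intro h0 hinv
    obtain ⟨i1, p1⟩ := ih (heappush h0 x) (heappush_inv h0 x hinv)
    refine ⟨i1, p1.trans ?_⟩
    have h2 : ((heappush h0 x) ++ t).Perm ((h0 ++ [x]) ++ t) := (perm_heappush h0 x).append_right t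
    simpa using h2

-- the comparison Bool used by sorted2 with keys fst, snd (exactly its unfolding)
def ltB (a b : Int × Int) : Bool :=
  decide (a.1 < b.1) || (!decide (b.1 < a.1) && decide (a.2 < b.2))

theorem ltB_iff (a b : Int × Int) : ltB a b = true ↔ pLt a b := by
  simp only [ltB, pLt, Bool.or_eq_true, Bool.and_eq_true, Bool.not_eq_true',
    decide_eq_true_eq, decide_eq_false_iff_not]
  omega

theorem sorted2_eq_foldl (xs : List (Int × Int)) :
    PySem.List.sorted2 xs (fun q => q.1) (fun q => q.2)
      = xs.foldl (fun acc x => PySem.List.insertBy ltB x acc) [] := rfl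

theorem insertBy_pairwise_pLe (x : Int × Int) (l : List (Int × Int))
    (h : List.Pairwise pLe l) : List.Pairwise pLe (PySem.List.insertBy ltB x l) := by
  induction l with
  | nil => rw [PySem.List.insertBy.eq_1]; simp
  | cons y ys ih =>
    obtain ⟨hy, hys⟩ := List.pairwise_cons.mp h
    rw [PySem.List.insertBy.eq_2]
    split_ifs with hb
    · have hxy : pLt x y := (ltB_iff x y).mp hb
      refine List.pairwise_cons.mpr ⟨?_, List.pairwise_cons.mpr ⟨hy, hys⟩⟩
      intro z hz
      rcases List.mem_cons.mp hz with hz | hz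
      · subst hz; exact pLt_le _ _ hxy
      · exact pLt_le_trans hxy (hy z hz)
    · refine List.pairwise_cons.mpr ⟨?_, ih hys⟩
      intro z hz
      rcases (PySem.List.mem_insertBy _ _ _ _).mp hz with hz | hz
      · have hnxy : ¬ pLt x y := fun hq => hb ((ltB_iff x y).mpr hq)
        rw [hz]
        exact (not_pLt x y).mp hnxy
      · exact hy z hz

theorem foldl_insertBy_pairwise (l : List (Int × Int)) :
    ∀ acc, List.Pairwise pLe acc →
    List.Pairwise pLe (l.foldl (fun acc x => PySem.List.insertBy ltB x acc) acc) := by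
  induction l with
  | nil => intro acc h; exact h
  | cons x t ih => intro acc h; exact ih _ (insertBy_pairwise_pLe x acc h)

-- two pLe-sorted lists that are permutations of each other coincide
theorem sorted_perm_unique {l1 l2 : List (Int × Int)} (hp : l1.Perm l2)
    (h1 : List.Pairwise pLe l1) (h2 : List.Pairwise pLe l2) : l1 = l2 :=
  List.eq_of_perm_of_sorted (fun a b _ _ hab hba => pLe_antisymm hab hba) h1 h2 hp

-- A's while-loop replayed over an explicit list of popped pairs
def runA : List (Int × Int) → List Bool → Nat → Int → Int
  | [], _, _, score => score
  | p :: rest, marked, n, score =>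
    if marked.getD p.2.toNat false then runA rest marked n score
    else
      let m1 := marked.set p.2.toNat true
      let m2 := if 0 < p.2 then m1.set (p.2 - 1).toNat true else m1
      let m3 := if p.2 < (n : Int) - 1 then m2.set (p.2 + 1).toNat true else m2
      runA rest m3 n (score + p.1)

theorem loopA_eq_runA (k : Nat) : ∀ (h : List (Int × Int)) (marked : List Bool) (n : Nat)
    (score : Int), h.length = k → loopA h marked n score = runA (popSeq h) marked n score := by
  induction k using Nat.strong_induction_on with
  | _ k ih =>
    intro h marked n score hk
    rw [loopA_eq, popSeq]
    by_cases hne : h = []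
    · simp [hne, runA]
    · rw [if_neg hne, dif_neg hne]
      have hl := length_heappop h hne
      simp only [runA]
      split_ifs
      all_goals exact ih ((heappop h).2.length) (by omega) _ _ n _ rfl

theorem getD_set_true (m : List Bool) (a j : Nat) (ha : a < m.length) :
    ((m.set a true).getD j false = true) ↔ (j = a ∨ m.getD j false = true) := by
  by_cases h : a = j
  · subst h; rw [getD_set_self _ _ _ _ ha]; simp
  · rw [getD_set_ne _ _ _ h]; simp [Ne.symm h]

-- B's greedy step over a marked set, used only in the proofs as the common middle ground:
-- one step of the "process sorted (value, index) pairs, skip marked, mark neighbors" fold.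
def stepB (st : Int × PySem.Set Int) (p : Int × Int) : Int × PySem.Set Int :=
  if st.2.contains p.2 then st
  else (st.1 + p.1, ((st.2.add (p.2 - 1)).add p.2).add (p.2 + 1))

theorem contains_iff (s : PySem.Set Int) (x : Int) : s.contains x = true ↔ x ∈ s := by
  simp [PySem.Set.contains]

-- the relation between A's boolean array and the set of marked indices
def RelMS (n : Nat) (marked : List Bool) (s : PySem.Set Int) : Prop :=
  marked.length = n ∧ ∀ k : Nat, k < n → (marked.getD k false = true ↔ (k : Int) ∈ s)

theorem relMS_mark (n : Nat) (marked : List Bool) (s : PySem.Set Int)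
    (hrel : RelMS n marked s) (i : Int) (h0 : 0 ≤ i) (hn : i < (n : Int)) :
    RelMS n
      (if i < (n : Int) - 1
       then (if 0 < i then (marked.set i.toNat true).set (i - 1).toNat true
             else marked.set i.toNat true).set (i + 1).toNat true
       else (if 0 < i then (marked.set i.toNat true).set (i - 1).toNat true
             else marked.set i.toNat true))
      (((s.add (i - 1)).add i).add (i + 1)) := by
  obtain ⟨hlen, hmem⟩ := hrel
  constructor
  · split_ifs <;> simp [hlen]
  · intro j hj
    simp only [PySem.Set.mem_add]
    split_ifs with hlt hpos hpos
    · rw [getD_set_true _ _ _ (by simp [hlen]; omega),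
        getD_set_true _ _ _ (by simp [hlen]; omega),
        getD_set_true _ _ _ (by omega), hmem j hj]
      by_cases hP : ((j : Int)) ∈ s <;> simp [hP] <;> omega
    · rw [getD_set_true _ _ _ (by simp [hlen]; omega),
        getD_set_true _ _ _ (by omega), hmem j hj]
      by_cases hP : ((j : Int)) ∈ s <;> simp [hP] <;> omega
    · rw [getD_set_true _ _ _ (by simp [hlen]; omega),
        getD_set_true _ _ _ (by omega), hmem j hj]
      by_cases hP : ((j : Int)) ∈ s <;> simp [hP] <;> omega
    · rw [getD_set_true _ _ _ (by omega), hmem j hj]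
      by_cases hP : ((j : Int)) ∈ s <;> simp [hP] <;> omega

theorem runA_eq_foldB : ∀ (l : List (Int × Int)) (marked : List Bool) (s : PySem.Set Int)
    (n : Nat) (score : Int), RelMS n marked s →
    (∀ p ∈ l, 0 ≤ p.2 ∧ p.2 < (n : Int)) →
    runA l marked n score = (l.foldl stepB (score, s)).1 := by
  intro l
  induction l with
  | nil => intro marked s n score hrel hb; rfl
  | cons p t ih =>
    intro marked s n score hrel hb
    obtain ⟨hp0, hpn⟩ := hb p List.mem_cons_self
    have hbt : ∀ q ∈ t, 0 ≤ q.2 ∧ q.2 < (n : Int) :=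
      fun q hq => hb q (List.mem_cons_of_mem _ hq)
    have hkn : p.2.toNat < n := by omega
    have hguard : (marked.getD p.2.toNat false = true) ↔ p.2 ∈ s := by
      rw [hrel.2 p.2.toNat hkn, Int.toNat_of_nonneg hp0]
    simp only [List.foldl_cons, runA, stepB]
    by_cases hm : marked.getD p.2.toNat false = true
    · have hc : s.contains p.2 = true := (contains_iff s p.2).mpr (hguard.mp hm)
      simp only [hm, if_true, hc]
      exact ih marked s n score hrel hbt
    · have hc : s.contains p.2 = false := by
        rw [Bool.eq_false_iff]
        intro hq
        exact hm (hguard.mpr ((contains_iff s p.2).mp hq))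
      simp only [hm, if_false, hc, Bool.false_eq_true]
      exact ih _ _ n (score + p.1) (relMS_mark n marked s hrel p.2 hp0 hpn) hbt

-- ===== the shared middle ground: both programs equal the fold of stepB over sorted pairs =====

def allPairs (nums : List Int) : List (Int × Int) :=
  (PySem.List.enumerate nums).map (fun p => (p.2, p.1))

def sortedAll (nums : List Int) : List (Int × Int) :=
  PySem.List.sorted2 (allPairs nums) (fun q => q.1) (fun q => q.2)

theorem pairs_snd_bounds (nums : List Int) :
    ∀ p ∈ allPairs nums, 0 ≤ p.2 ∧ p.2 < (nums.length : Int) := by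
  intro p hp
  obtain ⟨q, hq, hqe⟩ := List.mem_map.mp hp
  obtain ⟨k, hk, hke⟩ := (PySem.List.mem_enumerate_iff _ _ _).mp hq
  subst hqe; subst hke
  simp
  omega

theorem sortedAll_perm (nums : List Int) : (sortedAll nums).Perm (allPairs nums) :=
  PySem.List.sorted2_perm (allPairs nums) (fun q => q.1) (fun q => q.2) false

theorem pairwise_sortedAll (nums : List Int) : List.Pairwise pLe (sortedAll nums) := by
  rw [sortedAll, sorted2_eq_foldl]
  exact foldl_insertBy_pairwise (allPairs nums) [] List.Pairwise.nil

theorem A_eq_fold (nums : List Int) :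
    findScore nums = ((sortedAll nums).foldl stepB (0, PySem.Set.empty)).1 := by
  simp only [findScore]
  rw [show (PySem.List.enumerate nums).foldl (fun h p => heappush h (p.2, p.1)) []
      = (allPairs nums).foldl heappush [] by rw [allPairs, List.foldl_map]]
  obtain ⟨hbi, hbp⟩ := build_inv_perm (allPairs nums) [] (by intro c hc0 hcl; simp at hcl)
  rw [List.nil_append] at hbp
  obtain ⟨hps, hpw⟩ := popSeq_perm_pairwise ((allPairs nums).foldl heappush []).length _ rfl hbi
  have hkey : popSeq ((allPairs nums).foldl heappush []) = sortedAll nums :=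
    sorted_perm_unique ((hps.trans hbp).trans (sortedAll_perm nums).symm) hpw
      (pairwise_sortedAll nums)
  rw [loopA_eq_runA ((allPairs nums).foldl heappush []).length _
    (List.replicate nums.length false) nums.length 0 rfl, hkey]
  apply runA_eq_foldB
  · refine ⟨by simp, ?_⟩
    intro k hk
    constructor
    · intro hq
      rw [List.getD_eq_getElem _ _ (by simpa using hk)] at hq
      simp at hq
    · intro hq
      simp [PySem.Set.empty] at hq
  · intro p hp
    exact pairs_snd_bounds nums p ((sortedAll_perm nums).subset hp)

-- ===== B's side: the divide-and-conquer equals the same fold, segment by segment =====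

-- the pair the programs associate with index i (exact for 0 ≤ i < len nums)
def gP (nums : List Int) (i : Int) : Int × Int := (nums.getD i.toNat 0, i)

def segPairs (nums : List Int) (lo hi : Int) : List (Int × Int) :=
  (sortedAll nums).filter (fun p => decide (lo ≤ p.2) && decide (p.2 < hi))

def segScore (nums : List Int) (lo hi : Int) : Int :=
  ((segPairs nums lo hi).foldl stepB (0, PySem.Set.empty)).1

theorem mem_sortedAll (nums : List Int) (p : Int × Int) :
    p ∈ sortedAll nums ↔ ∃ k : Nat, k < nums.length ∧ p = (nums.getD k 0, (k : Int)) := by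
  rw [(sortedAll_perm nums).mem_iff, allPairs]
  simp only [List.mem_map, PySem.List.mem_enumerate_iff]
  constructor
  · rintro ⟨q, ⟨k, hk, rfl⟩, rfl⟩
    exact ⟨k, hk, by simp [List.getD, List.getElem?_eq_getElem hk]⟩
  · rintro ⟨k, hk, rfl⟩
    exact ⟨((k : Int), nums[k]), ⟨k, hk, by simp⟩,
      by simp [List.getD, List.getElem?_eq_getElem hk]⟩

theorem nodup_sortedAll (nums : List Int) : (sortedAll nums).Nodup := by
  refine (sortedAll_perm nums).nodup_iff.mpr ?_
  refine List.Nodup.map ?_ ?_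
  · intro p q hpq
    simpa [Prod.ext_iff, and_comm] using (Prod.ext_iff.mp hpq)
  · refine List.Pairwise.imp ?_ (PySem.List.pairwise_lt_enumerate nums 0)
    intro a b hab heq
    rw [heq] at hab
    omega

-- the argmin scan returns the unique (value, index)-minimal index of [lo, hi)
theorem argminGo_spec : ∀ (k : Nat) (nums : List Int) (lo m i : Int), lo ≤ m → m < i →
    (∀ j, lo ≤ j → j < i → j ≠ m → pLt (gP nums m) (gP nums j)) →
    lo ≤ argminGo nums m i k ∧ argminGo nums m i k < i + (k : Int) ∧
    ∀ j, lo ≤ j → j < i + (k : Int) → j ≠ argminGo nums m i k →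
      pLt (gP nums (argminGo nums m i k)) (gP nums j) := by
  intro k
  induction k with
  | zero =>
    intro nums lo m i h1 h2 h3
    simp only [argminGo]
    exact ⟨h1, by omega, by simpa using h3⟩
  | succ k ih =>
    intro nums lo m i h1 h2 h3
    simp only [argminGo]
    have hstep : ∀ j, lo ≤ j → j < i + 1 →
        j ≠ (if nums.getD i.toNat 0 < nums.getD m.toNat 0 then i else m) →
        pLt (gP nums (if nums.getD i.toNat 0 < nums.getD m.toNat 0 then i else m)) (gP nums j) := by
      intro j hj1 hj2 hj3
      split_ifs with hc
      · simp only [hc, if_true] at hj3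
        by_cases hjm : j = m
        · subst hjm
          exact Or.inl hc
        · rcases h3 j hj1 (by omega) hjm with hlt | ⟨heq, hlt2⟩
          · exact Or.inl (by simp only [gP] at hlt ⊢; omega)
          · exact Or.inl (by simp only [gP] at heq ⊢; omega)
      · simp only [hc, if_false] at hj3
        by_cases hji : j = i
        · subst hji
          simp only [pLt, gP]
          omega
        · exact h3 j hj1 (by omega) hj3
    have hres := ih nums lo (if nums.getD i.toNat 0 < nums.getD m.toNat 0 then i else m) (i + 1)
      (by split_ifs <;> omega) (by split_ifs <;> omega) hstep
    refine ⟨hres.1, by push_cast; push_cast at hres; omega, ?_⟩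
    intro j hj1 hj2 hj3
    exact hres.2.2 j hj1 (by push_cast; push_cast at hj2; omega) hj3

theorem argminSeg_spec (nums : List Int) (lo hi : Int) (h : lo < hi) :
    lo ≤ argminSeg nums lo hi ∧ argminSeg nums lo hi < hi ∧
    ∀ j, lo ≤ j → j < hi → j ≠ argminSeg nums lo hi →
      pLt (gP nums (argminSeg nums lo hi)) (gP nums j) := by
  unfold argminSeg
  have := argminGo_spec (hi - (lo + 1)).toNat nums lo lo (lo + 1) (le_refl lo) (by omega)
    (by intro j h1 h2 h3; omega)
  have hcast : (lo + 1) + (((hi - (lo + 1)).toNat : Int)) = hi := by omega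
  rw [hcast] at this
  exact this

-- the head of a nonempty segment's sorted pair list is the pair of its unique minimum index
theorem segPairs_cons (nums : List Int) (lo hi m : Int) (h0 : 0 ≤ lo)
    (hn : hi ≤ (nums.length : Int)) (hm1 : lo ≤ m) (hm2 : m < hi)
    (hmin : ∀ j, lo ≤ j → j < hi → j ≠ m → pLt (gP nums m) (gP nums j)) :
    ∃ t, segPairs nums lo hi = gP nums m :: t ∧
      (∀ p ∈ t, lo ≤ p.2 ∧ p.2 < hi ∧ p.2 ≠ m) := by
  have hgm : gP nums m ∈ segPairs nums lo hi := by
    rw [segPairs, List.mem_filter]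
    refine ⟨(mem_sortedAll nums _).mpr ⟨m.toNat, by omega, ?_⟩, by simp [gP]; omega⟩
    rw [gP, Int.toNat_of_nonneg (by omega : (0 : Int) ≤ m)]
  have hbounds : ∀ p ∈ segPairs nums lo hi,
      (∃ k : Nat, k < nums.length ∧ p = (nums.getD k 0, (k : Int))) ∧ lo ≤ p.2 ∧ p.2 < hi := by
    intro p hp
    rw [segPairs, List.mem_filter] at hp
    refine ⟨(mem_sortedAll nums p).mp hp.1, ?_⟩
    have := hp.2
    simp at this
    exact this
  have hpw : List.Pairwise pLe (segPairs nums lo hi) :=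
    List.Pairwise.filter _ (pairwise_sortedAll nums)
  have hnd : (segPairs nums lo hi).Nodup := (nodup_sortedAll nums).filter _
  have hidx : ∀ p ∈ segPairs nums lo hi, p.2 = m → p = gP nums m := by
    intro p hp hpm
    obtain ⟨⟨k, hk, hke⟩, _, _⟩ := hbounds p hp
    rw [hke] at hpm ⊢
    simp only at hpm
    rw [← hpm]
    simp [gP]
  rcases hseg : segPairs nums lo hi with _ | ⟨q, t⟩
  · rw [hseg] at hgm; simp at hgm
  · rw [hseg] at hgm hbounds hpw hnd hidx
    have hq : q = gP nums m := by
      by_cases hqm : q.2 = m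
      · exact hidx q List.mem_cons_self hqm
      · exfalso
        obtain ⟨⟨k, hk, hke⟩, hql, hqh⟩ := hbounds q List.mem_cons_self
        have hqg : q = gP nums q.2 := by rw [hke]; simp [gP]
        have hlt := hmin q.2 hql hqh hqm
        rw [← hqg] at hlt
        have hgmt : gP nums m ∈ t := by
          rcases List.mem_cons.mp hgm with hh | hh
          · exact absurd (by rw [← hh]; simp [gP] : q.2 = m) hqm
          · exact hh
        have hle := (List.pairwise_cons.mp hpw).1 _ hgmt
        rcases hlt with h | ⟨h1, h2⟩ <;> rcases hle with h' | ⟨h1', h2'⟩ <;> omega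
    refine ⟨t, by rw [hq], ?_⟩
    intro p hp
    obtain ⟨_, hpl, hph⟩ := hbounds p (List.mem_cons_of_mem _ hp)
    refine ⟨hpl, hph, ?_⟩
    intro hpm
    have hpq : p = gP nums m := hidx p (List.mem_cons_of_mem _ hp) hpm
    have hqt : q ∉ t := (List.nodup_cons.mp hnd).1
    rw [hq] at hqt
    rw [hpq] at hp
    exact hqt hp

-- the accumulator of the fold is additive
theorem foldl_stepB_shift : ∀ (l : List (Int × Int)) (a : Int) (S : PySem.Set Int),
    (l.foldl stepB (a, S)).1 = a + (l.foldl stepB (0, S)).1 := by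
  intro l
  induction l with
  | nil => intro a S; simp
  | cons p t ih =>
    intro a S
    simp only [List.foldl_cons, stepB]
    by_cases hc : S.contains p.2 = true
    · simp only [hc, if_true]
      exact ih a S
    · simp only [hc, if_false, Bool.false_eq_true]
      rw [ih (a + p.1), ih (0 + p.1)]
      omega

-- the core: after taking index m, the fold splits into the two independent subsegments
theorem decomp : ∀ (l : List (Int × Int)) (m : Int) (S Sl Sr : PySem.Set Int),
    (∀ p ∈ l, p.2 ≠ m) →
    (∀ j : Int, j ∈ Sl → j ≤ m - 1) →
    (∀ j : Int, j ∈ Sr → m + 1 ≤ j) →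
    (∀ j : Int, j ∈ S ↔ (j ∈ Sl ∨ j ∈ Sr ∨ j = m - 1 ∨ j = m ∨ j = m + 1)) →
    (l.foldl stepB (0, S)).1 =
      ((l.filter (fun p => decide (p.2 < m - 1))).foldl stepB (0, Sl)).1 +
      ((l.filter (fun p => decide (m + 1 < p.2))).foldl stepB (0, Sr)).1 := by
  intro l
  induction l with
  | nil => intro m S Sl Sr _ _ _ _; simp
  | cons p t ih =>
    intro m S Sl Sr hne hSl hSr hS
    have hpm : p.2 ≠ m := hne p List.mem_cons_self
    have hnet : ∀ q ∈ t, q.2 ≠ m := fun q hq => hne q (List.mem_cons_of_mem _ hq)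
    rcases lt_trichotomy p.2 (m - 1) with hlt | heq | hgt
    · -- p.2 < m - 1: processed by the left fold only
      have hfl : (p :: t).filter (fun p => decide (p.2 < m - 1))
          = p :: t.filter (fun p => decide (p.2 < m - 1)) := by
        simp [List.filter_cons, hlt]
      have hfr : (p :: t).filter (fun p => decide (m + 1 < p.2))
          = t.filter (fun p => decide (m + 1 < p.2)) := by
        simp [List.filter_cons]; omega
      rw [hfl, hfr]
      have hmemiff : p.2 ∈ S ↔ p.2 ∈ Sl := by
        rw [hS]
        constructor
        · rintro (h | h | h | h | h)
          · exact h
          · exact absurd (hSr _ h) (by omega)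
          all_goals omega
        · exact fun h => Or.inl h
      by_cases hc : Sl.contains p.2 = true
      · have hcS : S.contains p.2 = true :=
          (contains_iff _ _).mpr (hmemiff.mpr ((contains_iff _ _).mp hc))
        simp only [List.foldl_cons, stepB, hc, hcS, if_true]
        exact ih m S Sl Sr hnet hSl hSr hS
      · have hcS : S.contains p.2 = false := by
          rw [Bool.eq_false_iff]
          intro hq
          exact hc ((contains_iff _ _).mpr (hmemiff.mp ((contains_iff _ _).mp hq)))
        simp only [List.foldl_cons, stepB, hc, hcS, if_false, Bool.false_eq_true]
        rw [foldl_stepB_shift t, foldl_stepB_shift (t.filter _)]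
        have hrec := ih m (((S.add (p.2 - 1)).add p.2).add (p.2 + 1))
          (((Sl.add (p.2 - 1)).add p.2).add (p.2 + 1)) Sr hnet
          (by intro j hj
              simp only [PySem.Set.mem_add] at hj
              rcases hj with ((hj | hj) | hj) | hj
              · exact hSl j hj
              · omega
              · omega
              · omega)
          hSr
          (by intro j
              simp only [PySem.Set.mem_add, hS]
              tauto)
        rw [hrec]
        omega
    · -- p.2 = m - 1: always marked, dropped by both filters
      have hfl : (p :: t).filter (fun p => decide (p.2 < m - 1))
          = t.filter (fun p => decide (p.2 < m - 1)) := by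
        simp [List.filter_cons]; omega
      have hfr : (p :: t).filter (fun p => decide (m + 1 < p.2))
          = t.filter (fun p => decide (m + 1 < p.2)) := by
        simp [List.filter_cons]; omega
      have hcS : S.contains p.2 = true := (contains_iff _ _).mpr (by rw [hS]; tauto)
      rw [hfl, hfr]
      simp only [List.foldl_cons, stepB, hcS, if_true]
      exact ih m S Sl Sr hnet hSl hSr hS
    · rcases lt_trichotomy p.2 (m + 1) with hlt2 | heq2 | hgt2
      · -- p.2 = m + 1 (since p.2 > m - 1, p.2 ≠ m): always marked, dropped by both filters
        have hpe : p.2 = m + 1 := by omega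
        have hfl : (p :: t).filter (fun p => decide (p.2 < m - 1))
            = t.filter (fun p => decide (p.2 < m - 1)) := by
          simp [List.filter_cons]; omega
        have hfr : (p :: t).filter (fun p => decide (m + 1 < p.2))
            = t.filter (fun p => decide (m + 1 < p.2)) := by
          simp [List.filter_cons]; omega
        have hcS : S.contains p.2 = true := (contains_iff _ _).mpr (by rw [hS]; tauto)
        rw [hfl, hfr]
        simp only [List.foldl_cons, stepB, hcS, if_true]
        exact ih m S Sl Sr hnet hSl hSr hS
      · -- impossible: p.2 = m + 1 handled above; this branch is p.2 = m + 1 too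
        have hpe : p.2 = m + 1 := heq2
        have hfl : (p :: t).filter (fun p => decide (p.2 < m - 1))
            = t.filter (fun p => decide (p.2 < m - 1)) := by
          simp [List.filter_cons]; omega
        have hfr : (p :: t).filter (fun p => decide (m + 1 < p.2))
            = t.filter (fun p => decide (m + 1 < p.2)) := by
          simp [List.filter_cons]; omega
        have hcS : S.contains p.2 = true := (contains_iff _ _).mpr (by rw [hS]; tauto)
        rw [hfl, hfr]
        simp only [List.foldl_cons, stepB, hcS, if_true]
        exact ih m S Sl Sr hnet hSl hSr hS
      · -- m + 1 < p.2: processed by the right fold only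
        have hfl : (p :: t).filter (fun p => decide (p.2 < m - 1))
            = t.filter (fun p => decide (p.2 < m - 1)) := by
          simp [List.filter_cons]; omega
        have hfr : (p :: t).filter (fun p => decide (m + 1 < p.2))
            = p :: t.filter (fun p => decide (m + 1 < p.2)) := by
          simp [List.filter_cons, hgt2]
        rw [hfl, hfr]
        have hmemiff : p.2 ∈ S ↔ p.2 ∈ Sr := by
          rw [hS]
          constructor
          · rintro (h | h | h | h | h)
            · exact absurd (hSl _ h) (by omega)
            · exact h
            all_goals omega
          · exact fun h => Or.inr (Or.inl h)
        by_cases hc : Sr.contains p.2 = true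
        · have hcS : S.contains p.2 = true :=
            (contains_iff _ _).mpr (hmemiff.mpr ((contains_iff _ _).mp hc))
          simp only [List.foldl_cons, stepB, hc, hcS, if_true]
          exact ih m S Sl Sr hnet hSl hSr hS
        · have hcS : S.contains p.2 = false := by
            rw [Bool.eq_false_iff]
            intro hq
            exact hc ((contains_iff _ _).mpr (hmemiff.mp ((contains_iff _ _).mp hq)))
          simp only [List.foldl_cons, stepB, hc, hcS, if_false, Bool.false_eq_true]
          rw [foldl_stepB_shift t,
            foldl_stepB_shift (t.filter (fun p => decide (m + 1 < p.2)))]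
          have hrec := ih m (((S.add (p.2 - 1)).add p.2).add (p.2 + 1)) Sl
            (((Sr.add (p.2 - 1)).add p.2).add (p.2 + 1)) hnet hSl
            (by intro j hj
                simp only [PySem.Set.mem_add] at hj
                rcases hj with ((hj | hj) | hj) | hj
                · exact hSr j hj
                · omega
                · omega
                · omega)
            (by intro j
                simp only [PySem.Set.mem_add, hS]
                tauto)
          rw [hrec]
          omega

theorem segPairs_left (nums : List Int) (lo hi m : Int) (hm : lo ≤ m) (hmh : m < hi) :
    (segPairs nums lo hi).filter (fun p => decide (p.2 < m - 1)) = segPairs nums lo (m - 1) := by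
  rw [segPairs, segPairs, List.filter_filter]
  apply List.filter_congr
  intro p _
  rcases Decidable.em (lo ≤ p.2) with h1 | h1 <;> rcases Decidable.em (p.2 < hi) with h2 | h2 <;>
    rcases Decidable.em (p.2 < m - 1) with h3 | h3 <;>
      simp [h1, h2, h3] <;> omega

theorem segPairs_right (nums : List Int) (lo hi m : Int) (hm : lo ≤ m) (hmh : m < hi) :
    (segPairs nums lo hi).filter (fun p => decide (m + 1 < p.2)) = segPairs nums (m + 2) hi := by
  rw [segPairs, segPairs, List.filter_filter]
  apply List.filter_congr
  intro p _
  rcases Decidable.em (lo ≤ p.2) with h1 | h1 <;> rcases Decidable.em (p.2 < hi) with h2 | h2 <;>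
    rcases Decidable.em (m + 1 < p.2) with h3 | h3 <;>
      simp [h1, h2, h3] <;> omega

theorem segScore_empty (nums : List Int) (lo hi : Int) (h : hi ≤ lo) :
    segScore nums lo hi = 0 := by
  rw [segScore, show segPairs nums lo hi = [] from ?_]
  · rfl
  · rw [segPairs, List.filter_eq_nil_iff]
    intro p _
    simp
    omega

theorem segScore_rec (nums : List Int) (lo hi : Int) (h0 : 0 ≤ lo) (hlh : lo < hi)
    (hn : hi ≤ (nums.length : Int)) :
    segScore nums lo hi = nums.getD (argminSeg nums lo hi).toNat 0
      + segScore nums lo (argminSeg nums lo hi - 1)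
      + segScore nums (argminSeg nums lo hi + 2) hi := by
  obtain ⟨hm1, hm2, hmin⟩ := argminSeg_spec nums lo hi hlh
  obtain ⟨t, ht, htp⟩ :=
    segPairs_cons nums lo hi (argminSeg nums lo hi) h0 hn hm1 hm2 hmin
  set m := argminSeg nums lo hi with hmdef
  have hfilt_l := segPairs_left nums lo hi m hm1 hm2
  have hfilt_r := segPairs_right nums lo hi m hm1 hm2
  rw [ht] at hfilt_l hfilt_r
  have hheadl : (gP nums m :: t).filter (fun p => decide (p.2 < m - 1))
      = t.filter (fun p => decide (p.2 < m - 1)) := by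
    simp [List.filter_cons, gP]
  have hheadr : (gP nums m :: t).filter (fun p => decide (m + 1 < p.2))
      = t.filter (fun p => decide (m + 1 < p.2)) := by
    simp [List.filter_cons, gP]
  rw [hheadl] at hfilt_l
  rw [hheadr] at hfilt_r
  have hc0 : (PySem.Set.empty : PySem.Set Int).contains m = false := rfl
  rw [segScore, ht]
  simp only [List.foldl_cons, stepB, gP, hc0, if_false, Bool.false_eq_true]
  rw [foldl_stepB_shift]
  have hdec := decomp t m
    ((((PySem.Set.empty : PySem.Set Int).add (m - 1)).add m).add (m + 1))
    PySem.Set.empty PySem.Set.empty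
    (fun p hp => (htp p hp).2.2)
    (by intro j hj; simp [PySem.Set.empty] at hj)
    (by intro j hj; simp [PySem.Set.empty] at hj)
    (by intro j
        have hemp : ∀ x : Int, x ∈ (PySem.Set.empty : PySem.Set Int) ↔ False := by
          intro x; simp [PySem.Set.empty]
        simp only [PySem.Set.mem_add, hemp]
        tauto)
  rw [hdec, hfilt_l, hfilt_r]
  rw [segScore, segScore]
  omega

-- the stack loop sums the segment scores
theorem loopB_sum (nums : List Int) : ∀ (k : Nat) (stack : List (Int × Int)) (score : Int),
    (stack.map (fun s => 2 * (s.2 - s.1).toNat + 1)).sum = k →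
    (∀ s ∈ stack, 0 ≤ s.1 ∧ s.2 ≤ (nums.length : Int)) →
    loopB nums stack score = score + (stack.map (fun s => segScore nums s.1 s.2)).sum := by
  intro k
  induction k using Nat.strong_induction_on with
  | _ k ih =>
    intro stack score hk hb
    match stack with
    | [] => simp [loopB]
    | (lo, hi) :: rest =>
      obtain ⟨hlo, hhi⟩ := hb (lo, hi) List.mem_cons_self
      have hbr : ∀ s ∈ rest, 0 ≤ s.1 ∧ s.2 ≤ (nums.length : Int) :=
        fun s hs => hb s (List.mem_cons_of_mem _ hs)
      rw [loopB]
      split_ifs with hge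
      · rw [ih ((rest.map (fun s => 2 * (s.2 - s.1).toNat + 1)).sum)
          (by simp only [List.map_cons, List.sum_cons] at hk; omega) rest score rfl hbr]
        simp only [List.map_cons, List.sum_cons]
        rw [segScore_empty nums lo hi (by omega)]
        omega
      · have hm := argminSeg_mem nums lo hi (by omega)
        rw [ih ((((argminSeg nums lo hi + 2, hi) :: (lo, argminSeg nums lo hi - 1) :: rest).map
            (fun s => 2 * (s.2 - s.1).toNat + 1)).sum)
          (by simp only [List.map_cons, List.sum_cons] at hk ⊢; omega)
          _ _ rfl
          (by intro s hs
              rcases List.mem_cons.mp hs with h | h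
              · subst h; constructor <;> simp <;> omega
              · rcases List.mem_cons.mp h with h | h
                · subst h; constructor <;> simp <;> omega
                · exact hbr s h)]
        simp only [List.map_cons, List.sum_cons]
        rw [segScore_rec nums lo hi (by omega) (by omega) (by omega)]
        omega

theorem segPairs_full (nums : List Int) :
    segPairs nums 0 (nums.length : Int) = sortedAll nums := by
  rw [segPairs]
  apply List.filter_eq_self.mpr
  intro p hp
  have := pairs_snd_bounds nums p ((sortedAll_perm nums).subset hp)
  simp
  omega

-- ===== VERDICT (by name: the statement is the Claim_ definition above) =====
theorem findScore_spec : Claim_equal_findScore := by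
  unfold Claim_equal_findScore Spec_findScore
  intro nums _
  rw [A_eq_fold]
  rw [findScore_alt, loopB_sum nums _ [(0, (nums.length : Int))] 0 rfl
    (by intro s hs; rcases List.mem_cons.mp hs with h | h
        · subst h; constructor <;> simp
        · simp at h)]
  simp only [List.map_cons, List.map_nil, List.sum_cons, List.sum_nil]
  rw [segScore, segPairs_full]
  omega
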